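-- pv_equiv track=rewrite | github.com/GPS96/Caire-Hackathon-Challenge | data/arrhythmia_project/data_loader.py | _parse_label_from_header
-- ===== SOURCE A (Python) =====
-- from typing import Dict, Iterable, List, Optional
--
-- LABEL_ID_MAP = {
--     "Normal": 0,
--     "Asystole": 1,
--     "Ventricular_Flutter_Fib": 2,
--     "Tachycardia": 3,
--     "Bradycardia": 4,
-- }
--
-- IGNORE_TOKENS = {"true alarm", "artifact"}
--
-- SYNONYM_MAP = {
--     "normal": "Normal",
--     "normal rhythm": "Normal",
--     "normal sinus rhythm": "Normal",
--     "sinus rhythm": "Normal",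
--     "sinus": "Normal",
--     "nsr": "Normal",
--     "baseline": "Normal",
--     "vfib": "Ventricular_Flutter_Fib",
--     "vf": "Ventricular_Flutter_Fib",
--     "vflutter": "Ventricular_Flutter_Fib",
--     "brady": "Bradycardia",
--     "tach": "Tachycardia",
--     "tachy": "Tachycardia",
--     "asys": "Asystole",
-- }
--
-- def _parse_label_from_header(lines: Iterable[str]) -> Optional[str]:
--     """Extract a normalized arrhythmia label from header comment lines."""
--
--     detected_label: Optional[str] = None
--     saw_false_alarm = False
--
--     for raw_line in lines:
--         stripped = raw_line.strip()
--         if not stripped or not stripped.startswith("#"):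
--             continue
--
--         line = stripped.lower()
--         if "false alarm" in line:
--             saw_false_alarm = True
--
--         if any(token in line for token in IGNORE_TOKENS):
--             continue
--
--         for canonical in LABEL_ID_MAP:
--             if canonical.lower() in line:
--                 detected_label = canonical
--                 break
--         else:  # only executed when canonical loop does not break
--             for synonym, canonical in SYNONYM_MAP.items():
--                 if synonym in line:
--                     detected_label = canonical
--                     break
--             else:
--                 if "alarm" in line and "normal" in line:
--                     detected_label = "Normal"
--
--         if detected_label and saw_false_alarm:
--             return "Normal"
--
--     if saw_false_alarm:
--         return "Normal"
--
--     return detected_label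
-- ===== SOURCE B (Python) =====
-- from typing import Dict, Iterable, List, Optional, Tuple
--
-- LABEL_ID_MAP = {
--     "Normal": 0,
--     "Asystole": 1,
--     "Ventricular_Flutter_Fib": 2,
--     "Tachycardia": 3,
--     "Bradycardia": 4,
-- }
--
-- IGNORE_TOKENS = {"true alarm", "artifact"}
--
-- SYNONYM_MAP = {
--     "normal": "Normal",
--     "normal rhythm": "Normal",
--     "normal sinus rhythm": "Normal",
--     "sinus rhythm": "Normal",
--     "sinus": "Normal",
--     "nsr": "Normal",
--     "baseline": "Normal",
--     "vfib": "Ventricular_Flutter_Fib",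
--     "vf": "Ventricular_Flutter_Fib",
--     "vflutter": "Ventricular_Flutter_Fib",
--     "brady": "Bradycardia",
--     "tach": "Tachycardia",
--     "tachy": "Tachycardia",
--     "asys": "Asystole",
-- }
--
-- # Ordered token table: lowercased canonical names first, then synonyms.
-- _TOKEN_TABLE: List[Tuple[str, str]] = \
--     [(k.lower(), k) for k in LABEL_ID_MAP] + list(SYNONYM_MAP.items())
--
--
-- def _classify(comment: str) -> Optional[str]:
--     for token, label in _TOKEN_TABLE:
--         if token in comment:
--             return label
--     if "alarm" in comment and "normal" in comment:
--         return "Normal"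
--     return None
--
--
-- def _parse_label_from_header(lines: Iterable[str]) -> Optional[str]:
--     # NOTE: materializes the iterable (A may stop consuming it early); the
--     # return value is the same for any list input.
--     comments = [l.strip().lower() for l in lines if l.strip().startswith("#")]
--
--     # Any "false alarm" comment forces the final answer to "Normal".
--     if any("false alarm" in c for c in comments):
--         return "Normal"
--
--     # Otherwise the answer is the classification of the LAST classifiable,
--     # non-ignored comment line.
--     for c in reversed(comments):
--         if "true alarm" in c or "artifact" in c:
--             continue
--         label = _classify(c)
--         if label is not None:
--             return label
--     return None
-- ===== Notes on version B (the rewrite author's own statement) =====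
-- stated objective: alternative
-- what changed: Replaces A's single stateful forward loop (detected_label accumulator, saw_false_alarm flag, early return, nested for/else scans) with a staged pipeline: normalize the '#' comment lines once, decide 'false alarm' => Normal up front, then a reverse scan returning the classification of the last classifiable non-ignored comment.
import Mathlib
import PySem

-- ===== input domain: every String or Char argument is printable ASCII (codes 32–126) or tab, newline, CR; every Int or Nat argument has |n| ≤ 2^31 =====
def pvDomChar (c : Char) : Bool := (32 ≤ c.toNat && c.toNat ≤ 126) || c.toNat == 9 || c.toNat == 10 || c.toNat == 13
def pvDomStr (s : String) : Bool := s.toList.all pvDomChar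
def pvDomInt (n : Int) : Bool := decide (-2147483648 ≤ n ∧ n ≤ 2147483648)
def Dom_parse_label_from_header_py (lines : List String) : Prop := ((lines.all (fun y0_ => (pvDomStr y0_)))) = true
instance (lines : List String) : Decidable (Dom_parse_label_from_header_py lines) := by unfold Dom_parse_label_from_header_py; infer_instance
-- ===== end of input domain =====

-- B replaces A's single stateful loop (accumulator + flag + early return + nested
-- for/else) by a staged pipeline: normalize comments once, decide 'false alarm'
-- up front, then a reverse scan for the last classifiable comment (objective:
-- alternative; B materializes the iterable where A may stop consuming it early —
-- the return value on lists is identical).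

-- shared module constants (LABEL_ID_MAP keys and SYNONYM_MAP items, insertion order)
def pyCanonicalLabels : List String :=
  ["Normal", "Asystole", "Ventricular_Flutter_Fib", "Tachycardia", "Bradycardia"]

def pySynonymMap : List (String × String) :=
  [("normal", "Normal"), ("normal rhythm", "Normal"), ("normal sinus rhythm", "Normal"),
   ("sinus rhythm", "Normal"), ("sinus", "Normal"), ("nsr", "Normal"), ("baseline", "Normal"),
   ("vfib", "Ventricular_Flutter_Fib"), ("vf", "Ventricular_Flutter_Fib"),
   ("vflutter", "Ventricular_Flutter_Fib"), ("brady", "Bradycardia"),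
   ("tach", "Tachycardia"), ("tachy", "Tachycardia"), ("asys", "Asystole")]

-- ===== PORT A =====
-- A's for/else pair on one line: first-match scan over canonical names, else over
-- synonyms, else the alarm+normal fallback (else keep the old detected_label).
def aDetect (line : String) (det : Option String) : Option String :=
  match pyCanonicalLabels.find? (fun c => PySem.Str.isIn (PySem.Str.lower c) line) with
  | some c => some c
  | none =>
    match pySynonymMap.find? (fun p => PySem.Str.isIn p.1 line) with
    | some p => some p.2
    | none =>
      if PySem.Str.isIn "alarm" line && PySem.Str.isIn "normal" line then some "Normal" else det

-- A's main loop; state = (detected_label, saw_false_alarm)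
def aLoop : List String → Option String → Bool → Option String
  | [], det, saw => if saw then some "Normal" else det
  | raw :: rest, det, saw =>
    let stripped := PySem.Str.strip raw
    if stripped == "" || !(PySem.Str.startswith stripped "#") then aLoop rest det saw
    else
      let line := PySem.Str.lower stripped
      let saw' := saw || PySem.Str.isIn "false alarm" line
      -- any(token in line for token in IGNORE_TOKENS)
      if PySem.Str.isIn "true alarm" line || PySem.Str.isIn "artifact" line then aLoop rest det saw'
      else
        let det' := aDetect line det
        -- detected_label only ever holds a nonempty literal, so Python truthiness = isSome
        if det'.isSome && saw' then some "Normal" else aLoop rest det' saw'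

def parse_label_from_header_py (lines : List String) : Option String := aLoop lines none false

-- ===== PORT B =====
-- _TOKEN_TABLE = [(k.lower(), k) for k in LABEL_ID_MAP] + list(SYNONYM_MAP.items())
def bTokenTable : List (String × String) :=
  pyCanonicalLabels.map (fun k => (PySem.Str.lower k, k)) ++ pySynonymMap

-- _classify: first table token contained in the comment, else alarm+normal fallback
def bClassify (c : String) : Option String :=
  match bTokenTable.find? (fun p => PySem.Str.isIn p.1 c) with
  | some p => some p.2
  | none =>
    if PySem.Str.isIn "alarm" c && PySem.Str.isIn "normal" c then some "Normal" else none

-- comments = [l.strip().lower() for l in lines if l.strip().startswith("#")]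
def bComments (lines : List String) : List String :=
  (lines.filter (fun l => PySem.Str.startswith (PySem.Str.strip l) "#")).map
    (fun l => PySem.Str.lower (PySem.Str.strip l))

def parse_label_from_header_py_alt (lines : List String) : Option String :=
  let comments := bComments lines
  if comments.any (fun c => PySem.Str.isIn "false alarm" c) then some "Normal"
  else
    -- reverse scan: first (i.e. last) non-ignored comment that classifies
    comments.reverse.findSome? (fun c =>
      if PySem.Str.isIn "true alarm" c || PySem.Str.isIn "artifact" c then none
      else bClassify c)

-- ===== PRECONDITION & SPEC =====
def Spec_parse_label_from_header_py (lines : List String) (out : Option String) : Prop := out = parse_label_from_header_py_alt lines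
instance (lines : List String) (out : Option String) : Decidable (Spec_parse_label_from_header_py lines out) := by unfold Spec_parse_label_from_header_py; infer_instance

-- ===== CLAIM =====
def Claim_equal_parse_label_from_header_py : Prop := ∀ (lines : List String), Dom_parse_label_from_header_py lines → Spec_parse_label_from_header_py lines (parse_label_from_header_py lines)

-- ===== LEMMAS AND PROOFS =====

-- B's per-comment scan function
def bScan (c : String) : Option String :=
  if PySem.Str.isIn "true alarm" c || PySem.Str.isIn "artifact" c then none
  else bClassify c

-- A's skip condition equals B's keep condition negated ("" never starts with "#")
theorem keep_eq (s : String) :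
    (s == "" || !(PySem.Str.startswith s "#")) = !(PySem.Str.startswith s "#") := by
  by_cases h : s = ""
  · subst h; decide
  · simp [h]

-- A's for/else double scan equals B's token-table classify (with fallback det)
theorem detect_eq (line : String) (det : Option String) :
    aDetect line det = (bClassify line).orElse (fun _ => det) := by
  unfold aDetect bClassify bTokenTable
  rw [List.find?_append, List.find?_map]
  have key : (List.find? ((fun p => PySem.Str.isIn p.1 line) ∘ fun k => (PySem.Str.lower k, k))
        pyCanonicalLabels) =
      List.find? (fun c => PySem.Str.isIn (PySem.Str.lower c) line) pyCanonicalLabels := rfl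
  rw [key]
  cases h : List.find? (fun c => PySem.Str.isIn (PySem.Str.lower c) line) pyCanonicalLabels with
  | some c => rfl
  | none =>
    cases hs : List.find? (fun p => PySem.Str.isIn p.1 line) pySynonymMap with
    | some p => rfl
    | none => split_ifs <;> rfl

-- characterization of A's loop by B's staged pipeline
theorem loop_char : ∀ (lines : List String) (det : Option String) (saw : Bool),
    aLoop lines det saw =
      if saw || (bComments lines).any (fun c => PySem.Str.isIn "false alarm" c) then some "Normal"
      else ((bComments lines).reverse.findSome? bScan).orElse (fun _ => det) := by
  intro lines
  induction lines with
  | nil =>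
    intro det saw
    cases saw <;> simp [aLoop, bComments]
  | cons raw rest ih =>
    intro det saw
    rw [aLoop]
    rw [keep_eq]
    by_cases hk : PySem.Str.startswith (PySem.Str.strip raw) "#" = true
    · rw [if_neg (by rw [hk]; simp)]
      have hcom : bComments (raw :: rest) =
          PySem.Str.lower (PySem.Str.strip raw) :: bComments rest := by
        simp only [bComments, List.filter_cons]
        rw [if_pos hk, List.map_cons]
      set line := PySem.Str.lower (PySem.Str.strip raw) with hline
      rw [hcom]
      simp only [List.any_cons, List.reverse_cons, List.findSome?_append]
      by_cases hig : (PySem.Str.isIn "true alarm" line || PySem.Str.isIn "artifact" line) = true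
      · rw [if_pos hig, ih]
        have hscan : List.findSome? bScan [line] = none := by
          simp only [List.findSome?_cons, List.findSome?_nil]
          unfold bScan; rw [if_pos hig]
        rw [hscan, Bool.or_assoc]
        by_cases hc : (saw || (PySem.Str.isIn "false alarm" line ||
            (bComments rest).any fun c => PySem.Str.isIn "false alarm" c)) = true
        · rw [if_pos hc, if_pos hc]
        · rw [if_neg hc, if_neg hc]
          cases hfs : ((bComments rest).reverse.findSome? bScan) <;> rfl
      · rw [if_neg hig, detect_eq]
        have hscan : List.findSome? bScan [line] = bClassify line := by
          simp only [List.findSome?_cons, List.findSome?_nil]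
          unfold bScan; rw [if_neg hig]
          cases h : bClassify line <;> rfl
        rw [hscan]
        by_cases hsaw : (saw || PySem.Str.isIn "false alarm" line) = true
        · -- false alarm already seen: everything ends in "Normal"
          have hcond : (saw || (PySem.Str.isIn "false alarm" line ||
              (bComments rest).any fun c => PySem.Str.isIn "false alarm" c)) = true := by
            rcases Bool.or_eq_true_iff.mp hsaw with h | h
            · rw [h]; rfl
            · rw [h]; cases saw <;> rfl
          rw [if_pos hcond]
          cases hcl : ((bClassify line).orElse fun _ => det) with
          | some v => rw [if_pos (by rw [hsaw]; rfl)]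
          | none =>
            rw [if_neg (by simp)]
            rw [ih, if_pos (by rw [hsaw]; rfl)]
        · have h' : (saw || PySem.Str.isIn "false alarm" line) = false := by
            cases hx : (saw || PySem.Str.isIn "false alarm" line)
            · rfl
            · exact absurd hx hsaw
          obtain ⟨hs, hf⟩ := Bool.or_eq_false_iff.mp h'
          rw [if_neg (by rw [hs, hf]; simp)]
          rw [ih]
          rw [hs, hf]
          simp only [Bool.false_or]
          by_cases hrest : ((bComments rest).any fun c => PySem.Str.isIn "false alarm" c) = true
          · rw [if_pos hrest, if_pos hrest]
          · rw [if_neg hrest, if_neg hrest]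
            cases hfs : ((bComments rest).reverse.findSome? bScan) <;>
              cases hcl : bClassify line <;> rfl
    · -- line skipped by both
      have hk' : PySem.Str.startswith (PySem.Str.strip raw) "#" = false := by
        simpa using hk
      rw [if_pos (by rw [hk']; rfl)]
      have hcom : bComments (raw :: rest) = bComments rest := by
        simp only [bComments, List.filter_cons]
        rw [if_neg (by rw [hk']; simp)]
      rw [hcom, ih]

-- ===== VERDICT =====
theorem parse_label_from_header_py_spec : Claim_equal_parse_label_from_header_py := by
  intro lines _
  unfold Spec_parse_label_from_header_py parse_label_from_header_py parse_label_from_header_py_alt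
  rw [loop_char]
  have hb : (fun c => if PySem.Str.isIn "true alarm" c || PySem.Str.isIn "artifact" c
      then none else bClassify c) = bScan := rfl
  rw [hb, Bool.false_or]
  by_cases h : ((bComments lines).any fun c => PySem.Str.isIn "false alarm" c) = true
  · rw [if_pos h, if_pos h]
  · rw [if_neg h, if_neg h]
    cases hfs : ((bComments lines).reverse.findSome? bScan) <;> rfl
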